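-- pv_equiv track=rewrite | github.com/Vlad-Shcherbina/icfpc2018-tbd | production/pillar_solver.py | long_distances
-- ===== SOURCE A (Python) =====
-- def long_distances(d):
--   assert d != 0
--   if d > 0:
--     while d > 15:
--       yield 15
--       d -= 15
--     yield d
--   elif d < 0:
--     while d < -15:
--       yield -15
--       d += 15
--     yield d
-- ===== SOURCE B (Python) =====
-- def long_distances(d):
--     assert d != 0
--     sign = 1 if d > 0 else -1
--     m = abs(d)
--     full = (m - 1) // 15
--     rem = m - 15 * full
--     for _ in range(full):
--         yield sign * 15
--     yield sign * rem
-- ===== Notes on version B (the rewrite author's own statement) =====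
-- stated objective: simpler
-- what changed: Replaces the repeated-subtraction loop with a closed-form count full=(|d|-1)//15 and remainder, emitting full 15-chunks and one final remainder chunk.
import Mathlib
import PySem

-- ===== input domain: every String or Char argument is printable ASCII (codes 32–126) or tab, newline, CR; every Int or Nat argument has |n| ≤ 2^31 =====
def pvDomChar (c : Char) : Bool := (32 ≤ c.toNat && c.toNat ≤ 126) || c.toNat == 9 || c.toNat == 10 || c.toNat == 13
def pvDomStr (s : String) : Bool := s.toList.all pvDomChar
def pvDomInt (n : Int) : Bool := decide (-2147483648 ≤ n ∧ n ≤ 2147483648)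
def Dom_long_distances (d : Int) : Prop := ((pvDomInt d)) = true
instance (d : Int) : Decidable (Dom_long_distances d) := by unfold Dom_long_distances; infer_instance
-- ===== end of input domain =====

-- B replaces A's repeated-subtraction loop with a closed-form chunk count; equivalence of return values (A is a generator, ported as the list it yields).

-- ===== PORT A =====
-- while d > 15: yield 15; d -= 15; then yield d
def posLoop (d : Int) : List Int :=
  if d > 15 then 15 :: posLoop (d - 15) else [d]
termination_by d.toNat
decreasing_by omega

-- while d < -15: yield -15; d += 15; then yield d
def negLoop (d : Int) : List Int :=
  if d < -15 then -15 :: negLoop (d + 15) else [d]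
termination_by (-d).toNat
decreasing_by omega

def long_distances (d : Int) : List Int :=
  if d > 0 then posLoop d
  else if d < 0 then negLoop d
  else []  -- d = 0: assert fails in Python (excluded by Pre_)

-- ===== PORT B =====
def long_distances_alt (d : Int) : List Int :=
  let sign : Int := if d > 0 then 1 else -1
  let m : Int := d.natAbs
  let full : Int := PySem.Int.floordiv (m - 1) 15
  let rem : Int := m - 15 * full
  List.replicate full.toNat (sign * 15) ++ [sign * rem]

-- ===== PRECONDITION & SPEC =====
-- Pre_ excludes d = 0, where A's `assert d != 0` raises AssertionError.
def Pre_long_distances (d : Int) : Prop := d ≠ 0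
instance (d : Int) : Decidable (Pre_long_distances d) := by unfold Pre_long_distances; infer_instance
def pvWitness_long_distances : Int := 37

def Spec_long_distances (d : Int) (out : List Int) : Prop := out = long_distances_alt d
instance (d : Int) (out : List Int) : Decidable (Spec_long_distances d out) := by unfold Spec_long_distances; infer_instance

-- ===== CLAIM =====
def Claim_equal_long_distances : Prop := ∀ (d : Int), Dom_long_distances d → Pre_long_distances d → Spec_long_distances d (long_distances d)

-- ===== LEMMAS AND PROOFS =====
lemma posLoop_closed (d : Int) (hd : 0 < d) :
    posLoop d = List.replicate ((d - 1).toNat / 15) 15 ++ [d - 15 * ((d - 1).toNat / 15)] := by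
  induction d using posLoop.induct with
  | case1 d h ih =>
      rw [posLoop, if_pos h, ih (by omega)]
      have h1 : (d - 1).toNat = (d - 15 - 1).toNat + 15 := by omega
      have h2 : (d - 1).toNat / 15 = (d - 15 - 1).toNat / 15 + 1 := by
        rw [h1]; omega
      rw [h2, List.replicate_succ]
      simp only [List.cons_append, List.cons.injEq, List.append_cancel_left_eq, true_and, and_true]
      omega
  | case2 d h =>
      rw [posLoop, if_neg h]
      have h0 : (d - 1).toNat / 15 = 0 := by omega
      rw [h0]
      simp only [List.replicate_zero, List.nil_append, List.cons.injEq, and_true]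
      omega

lemma negLoop_closed (d : Int) (hd : d < 0) :
    negLoop d = List.replicate ((-d - 1).toNat / 15) (-15) ++ [d + 15 * ((-d - 1).toNat / 15)] := by
  induction d using negLoop.induct with
  | case1 d h ih =>
      rw [negLoop, if_pos h, ih (by omega)]
      have h2 : (-d - 1).toNat / 15 = (-(d + 15) - 1).toNat / 15 + 1 := by
        have h1 : (-d - 1).toNat = (-(d + 15) - 1).toNat + 15 := by omega
        rw [h1]; omega
      rw [h2, List.replicate_succ]
      simp only [List.cons_append, List.cons.injEq, List.append_cancel_left_eq, true_and, and_true]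
      omega
  | case2 d h =>
      rw [negLoop, if_neg h]
      have h0 : (-d - 1).toNat / 15 = 0 := by
        omega
      rw [h0]
      simp only [List.replicate_zero, List.nil_append, List.cons.injEq, and_true]
      omega

lemma floordiv_key (m : Int) (hm : 0 < m) :
    PySem.Int.floordiv (m - 1) 15 = ((m - 1).toNat / 15 : Nat) := by
  rw [PySem.Int.floordiv_eq_ediv_of_pos (by norm_num)]
  omega

-- ===== VERDICT =====
theorem long_distances_spec : Claim_equal_long_distances := by
  intro d _ hpre
  unfold Spec_long_distances long_distances long_distances_alt
  rcases lt_trichotomy d 0 with h | h | h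
  · rw [if_neg (by omega), if_pos h, negLoop_closed d h]
    have hna : (d.natAbs : Int) = -d := by omega
    have hsign : (if d > 0 then (1:Int) else -1) = -1 := by rw [if_neg (by omega)]
    simp only [hsign, hna, floordiv_key (-d) (by omega), Int.toNat_natCast, neg_mul, one_mul]
    congr 1
    simp only [List.cons.injEq, and_true]
    push_cast
    ring
  · exact absurd h hpre
  · rw [if_pos h, posLoop_closed d h]
    have hna : (d.natAbs : Int) = d := by omega
    have hsign : (if d > 0 then (1:Int) else -1) = 1 := by rw [if_pos h]
    simp only [hsign, hna, floordiv_key d h, one_mul, Int.toNat_natCast]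
    push_cast
    ring
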